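-- pv_equiv track=rewrite | github.com/DwqeAndFriends/ComputerNetworks | Exp2/Stuffing.py | ZeroBitStuffing
-- ===== SOURCE A (Python) =====
-- def ZeroBitStuffing(InfoString1,flagString):
--     newString=""
--     one_cnt = 0;
--     infoChars = list(InfoString1)
--     for ch in infoChars:
--         newString=newString+ch
--         if ch == '1':
--             one_cnt=one_cnt+1
--             if one_cnt == 5:
--                 newString=newString+'0'
--                 one_cnt = 0
--         else:
--             one_cnt = 0
--     return flagString + newString + flagString
-- ===== SOURCE B (Python) =====
-- def ZeroBitStuffing(InfoString1, flagString):
--     return flagString + InfoString1.replace('11111', '111110') + flagString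
-- ===== Notes on version B (the rewrite author's own statement) =====
-- stated objective: idiomatic
-- what changed: Replaces the per-character loop with a ones-counter by a single non-overlapping str.replace('11111','111110') of the body between the flags.
import Mathlib
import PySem

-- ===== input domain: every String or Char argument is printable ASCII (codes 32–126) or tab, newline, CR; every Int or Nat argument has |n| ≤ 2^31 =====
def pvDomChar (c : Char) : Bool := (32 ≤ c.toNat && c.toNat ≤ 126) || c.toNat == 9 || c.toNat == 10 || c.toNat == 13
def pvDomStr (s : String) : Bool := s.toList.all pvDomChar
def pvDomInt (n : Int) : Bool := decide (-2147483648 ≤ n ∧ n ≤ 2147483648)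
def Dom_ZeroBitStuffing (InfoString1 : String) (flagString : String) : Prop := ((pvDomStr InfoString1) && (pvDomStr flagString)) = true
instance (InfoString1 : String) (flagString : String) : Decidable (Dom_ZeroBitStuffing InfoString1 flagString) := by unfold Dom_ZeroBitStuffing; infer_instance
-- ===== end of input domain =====

-- B replaces A's per-character loop with a ones-counter by one non-overlapping
-- replacement of "11111" by "111110" on the body (objective: idiomatic).

-- ===== PORT A =====
-- A's for-loop over the characters, carrying the accumulated string and the ones-counter
def pvALoop : List Char → List Char → Int → List Char
  | [], acc, _ => acc
  | ch :: rest, acc, one_cnt =>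
    let acc' := acc ++ [ch]
    if ch = '1' then
      let c' := one_cnt + 1
      if c' = 5 then pvALoop rest (acc' ++ ['0']) 0
      else pvALoop rest acc' c'
    else pvALoop rest acc' 0

def ZeroBitStuffing (InfoString1 : String) (flagString : String) : String :=
  flagString ++ String.mk (pvALoop InfoString1.toList [] 0) ++ flagString

-- ===== PORT B =====
-- non-overlapping left-to-right scan of str.replace('11111','111110')
def pvBRepl : List Char → List Char
  | [] => []
  | x :: rest =>
    if x = '1' ∧ rest.take 4 = ['1', '1', '1', '1'] then
      '1' :: '1' :: '1' :: '1' :: '1' :: '0' :: pvBRepl (rest.drop 4)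
    else x :: pvBRepl rest
termination_by l => l.length
decreasing_by
  all_goals simp only [List.length_drop, List.length_cons]
  all_goals omega

def ZeroBitStuffing_alt (InfoString1 : String) (flagString : String) : String :=
  flagString ++ String.mk (pvBRepl InfoString1.toList) ++ flagString

-- ===== PRECONDITION & SPEC =====
def Spec_ZeroBitStuffing (InfoString1 : String) (flagString : String) (out : String) : Prop := out = ZeroBitStuffing_alt InfoString1 flagString
instance (InfoString1 : String) (flagString : String) (out : String) : Decidable (Spec_ZeroBitStuffing InfoString1 flagString out) := by unfold Spec_ZeroBitStuffing; infer_instance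

-- ===== CLAIM (what is proved, stated in full; the proofs are below) =====
def Claim_equal_ZeroBitStuffing : Prop := ∀ (InfoString1 : String) (flagString : String), Dom_ZeroBitStuffing InfoString1 flagString → Spec_ZeroBitStuffing InfoString1 flagString (ZeroBitStuffing InfoString1 flagString)

-- ===== LEMMAS AND PROOFS =====

-- A's loop accumulates on the left: the accumulator factors out
lemma pvALoop_acc (l : List Char) : ∀ (acc : List Char) (c : Int),
    pvALoop l acc c = acc ++ pvALoop l [] c := by
  induction l with
  | nil => intro acc c; simp [pvALoop]
  | cons ch rest ih =>
    intro acc c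
    simp only [pvALoop]
    split_ifs with h1 h5
    · rw [ih (acc ++ [ch] ++ ['0']), ih ([] ++ [ch] ++ ['0'])]; simp
    · rw [ih (acc ++ [ch]), ih ([] ++ [ch])]; simp
    · rw [ih (acc ++ [ch]), ih ([] ++ [ch])]; simp

-- key invariant: after having seen c (≤ 4) consecutive ones, A's loop computes
-- exactly the tail of the non-overlapping replacement of the ones prefixed back on
lemma pvKey : ∀ (n : Nat) (l : List Char), l.length ≤ n → ∀ (c : Nat), c ≤ 4 →
    pvBRepl (List.replicate c '1' ++ l) = List.replicate c '1' ++ pvALoop l [] (c : Int) := by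
  intro n
  induction n with
  | zero =>
    intro l hl c hc
    have : l = [] := List.eq_nil_of_length_eq_zero (Nat.le_zero.mp hl)
    subst this
    interval_cases c <;> simp [pvBRepl, pvALoop, List.replicate]
  | succ n ih =>
    intro l hl c hc
    match l with
    | [] => interval_cases c <;> simp [pvBRepl, pvALoop, List.replicate]
    | x :: rest =>
      have hrest : rest.length ≤ n := by simpa using Nat.succ_le_succ_iff.mp hl
      have h3 := ih rest hrest 0 (by omega)
      simp only [List.replicate, List.nil_append, Nat.cast_zero] at h3
      by_cases hx : x = '1'
      · subst hx
        by_cases hc4 : c = 4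
        · subst hc4
          have h1 : List.replicate 4 '1' ++ '1' :: rest
              = '1' :: '1' :: '1' :: '1' :: '1' :: rest := by
            simp [List.replicate]
          have h2 : pvBRepl ('1' :: '1' :: '1' :: '1' :: '1' :: rest)
              = '1' :: '1' :: '1' :: '1' :: '1' :: '0' :: pvBRepl rest := by
            simp [pvBRepl]
          rw [h1, h2, h3]
          have h45 : ((4 : Nat) : Int) + 1 = 5 := by norm_num
          simp only [pvALoop, if_true, if_pos h45]
          rw [pvALoop_acc rest ([] ++ ['1'] ++ ['0']) 0]
          simp [List.replicate]
        · -- c < 4 : fold the new one into the replicate prefix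
          have hc' : c + 1 ≤ 4 := by omega
          have hrepl : List.replicate c '1' ++ '1' :: rest
              = List.replicate (c + 1) '1' ++ rest := by
            rw [List.replicate_succ']; simp
          rw [hrepl, ih rest hrest (c + 1) hc']
          have h5 : ¬ ((c : Int) + 1 = 5) := by omega
          simp only [pvALoop, if_true, if_neg h5]
          rw [pvALoop_acc rest ([] ++ ['1']) ((c : Int) + 1)]
          rw [List.replicate_succ']
          push_cast
          simp
      · -- x ≠ '1' : the replacement strips the ones prefix and x unchanged
        have hstrip : pvBRepl (List.replicate c '1' ++ x :: rest)
            = List.replicate c '1' ++ x :: pvBRepl rest := by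
          interval_cases c <;>
            simp [pvBRepl, List.take, hx]
        rw [hstrip, h3]
        simp only [pvALoop, if_neg hx]
        rw [pvALoop_acc rest ([] ++ [x]) 0]
        simp

-- ===== VERDICT (by name: the statement is the Claim_ definition above) =====
theorem ZeroBitStuffing_spec : Claim_equal_ZeroBitStuffing := by
  intro s f _
  unfold Spec_ZeroBitStuffing ZeroBitStuffing ZeroBitStuffing_alt
  have h := pvKey s.toList.length s.toList le_rfl 0 (by omega)
  simp only [List.replicate, List.nil_append, Nat.cast_zero] at h
  rw [h]
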